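-- pv_equiv track=rewrite | github.com/obss/turkish-question-generation | utils/nlp.py | get_sentence_indices_list
-- ===== SOURCE A (Python) =====
-- from typing import Dict, List, Union
--
-- def get_sentence_indices_list(sentence_list: List[str]):
--     """
--     Args:
--         sentence_list List[str]
--
--     Returns:
--         List of 'start' and 'end' indexes of sentences
--     """
--
--     sentence_indices_list: List[Dict] = []
--     prev_end_idx = 0
--     for sentence_ind, sentence in enumerate(sentence_list):
--         if sentence_ind == 0:
--             start_idx = 0
--             end_idx = len(sentence)
--         else:
--             start_idx = prev_end_idx
--             end_idx = prev_end_idx + len(sentence)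
--         prev_end_idx = end_idx
--         sentence_indices_list.append({"sentence_start": start_idx, "sentence_end": end_idx})
--     return sentence_indices_list
-- ===== SOURCE B (Python) =====
-- from typing import List
--
-- def get_sentence_indices_list(sentence_list: List[str]):
--     # Walk the list BACKWARDS from the total length, subtracting each sentence's
--     # length; the output is built back-to-front and reversed at the end.
--     end = sum(len(s) for s in sentence_list)
--     out = []
--     for s in reversed(sentence_list):
--         out.append({"sentence_start": end - len(s), "sentence_end": end})
--         end -= len(s)
--     out.reverse()
--     return out
-- ===== Notes on version B (the rewrite author's own statement) =====
-- stated objective: alternative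
-- what changed: Instead of A's forward loop threading a running prev_end_idx (with a special first-iteration branch), B computes the total length once, traverses the list in reverse subtracting each sentence's length, builds the output back-to-front and reverses it at the end.
import Mathlib
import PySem

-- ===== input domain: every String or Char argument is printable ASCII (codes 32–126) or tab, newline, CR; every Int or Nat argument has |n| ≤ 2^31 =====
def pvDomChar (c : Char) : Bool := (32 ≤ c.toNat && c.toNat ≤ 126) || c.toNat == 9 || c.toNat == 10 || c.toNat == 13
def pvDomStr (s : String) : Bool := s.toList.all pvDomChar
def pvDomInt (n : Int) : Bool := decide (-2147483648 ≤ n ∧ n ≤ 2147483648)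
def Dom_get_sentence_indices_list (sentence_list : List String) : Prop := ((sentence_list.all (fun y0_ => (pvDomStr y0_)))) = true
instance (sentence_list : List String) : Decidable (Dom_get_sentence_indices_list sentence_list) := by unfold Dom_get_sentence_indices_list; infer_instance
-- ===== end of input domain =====

-- B replaces A's forward accumulator loop by a reverse traversal from the total length, building the output back-to-front (objective: alternative, same O(n) cost).


-- ===== PORT A =====
-- loop body of A: enumerate with running prev_end_idx
def getSIL_goA (ind : Int) (prev : Int) : List String → List (List (String × Int))
  | [] => []
  | s :: rest =>
    let start_idx : Int := if ind = 0 then 0 else prev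
    let end_idx : Int := if ind = 0 then PySem.Str.len s else prev + PySem.Str.len s
    [("sentence_start", start_idx), ("sentence_end", end_idx)] :: getSIL_goA (ind + 1) end_idx rest

def get_sentence_indices_list (sentence_list : List String) : List (List (String × Int)) :=
  getSIL_goA 0 0 sentence_list

-- ===== PORT B =====
-- B's loop: 'for s in reversed(sentence_list)', appending to out and decreasing end
def getSIL_goB (e : Int) : List String → List (List (String × Int)) → List (List (String × Int))
  | [], out => out
  | s :: rest, out =>
    getSIL_goB (e - PySem.Str.len s) rest
      (out ++ [[("sentence_start", e - PySem.Str.len s), ("sentence_end", e)]])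

def get_sentence_indices_list_alt (sentence_list : List String) : List (List (String × Int)) :=
  let total : Int := (sentence_list.map (fun s => PySem.Str.len s)).sum
  (getSIL_goB total sentence_list.reverse []).reverse

-- ===== PRECONDITION & SPEC =====
def Spec_get_sentence_indices_list (sentence_list : List String) (out : List (List (String × Int))) : Prop := out = get_sentence_indices_list_alt sentence_list
instance (sentence_list : List String) (out : List (List (String × Int))) : Decidable (Spec_get_sentence_indices_list sentence_list out) := by unfold Spec_get_sentence_indices_list; infer_instance

-- ===== CLAIM (what is proved, stated in full; the proofs are below) =====
def Claim_equal_get_sentence_indices_list : Prop := ∀ (sentence_list : List String), Dom_get_sentence_indices_list sentence_list → Spec_get_sentence_indices_list sentence_list (get_sentence_indices_list sentence_list)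

-- ===== LEMMAS AND PROOFS =====
-- reference spans: forward list of dicts starting at offset acc
def getSIL_spansFrom (acc : Int) : List String → List (List (String × Int))
  | [] => []
  | s :: rest =>
    [("sentence_start", acc), ("sentence_end", acc + PySem.Str.len s)] ::
      getSIL_spansFrom (acc + PySem.Str.len s) rest

-- A's loop from any index i ≥ 1 equals the reference spans from acc.
lemma getSIL_goA_eq (xs : List String) : ∀ (i acc : Int), 1 ≤ i →
    getSIL_goA i acc xs = getSIL_spansFrom acc xs := by
  induction xs with
  | nil => intro i acc _; simp [getSIL_goA, getSIL_spansFrom]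
  | cons s rest ih =>
    intro i acc hi
    have hne : i ≠ 0 := by omega
    simp only [getSIL_goA, getSIL_spansFrom, if_neg hne]
    rw [ih (i + 1) (acc + PySem.Str.len s) (by omega)]

-- B's loop splits over list append.
lemma getSIL_goB_append (l1 l2 : List String) : ∀ (e : Int) (out : List (List (String × Int))),
    getSIL_goB e (l1 ++ l2) out =
      getSIL_goB (e - (l1.map (fun s => PySem.Str.len s)).sum) l2 (getSIL_goB e l1 out) := by
  induction l1 with
  | nil => intro e out; simp [getSIL_goB]
  | cons s rest ih =>
    intro e out
    simp only [List.cons_append, getSIL_goB, List.map_cons, List.sum_cons, ih]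
    ring_nf

-- B's reverse-traversal from acc + total produces the reversed reference spans.
lemma getSIL_goB_eq (xs : List String) : ∀ (acc : Int),
    getSIL_goB (acc + (xs.map (fun s => PySem.Str.len s)).sum) xs.reverse [] =
      (getSIL_spansFrom acc xs).reverse := by
  induction xs with
  | nil => intro acc; simp [getSIL_goB, getSIL_spansFrom]
  | cons s rest ih =>
    intro acc
    simp only [List.reverse_cons, getSIL_spansFrom, List.map_cons, List.sum_cons]
    rw [getSIL_goB_append]
    have h1 : acc + (PySem.Str.len s + (rest.map (fun s => PySem.Str.len s)).sum)
        = (acc + PySem.Str.len s) + (rest.map (fun s => PySem.Str.len s)).sum := by ring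
    rw [h1, ih (acc + PySem.Str.len s)]
    simp only [getSIL_goB, List.map_reverse, List.sum_reverse]
    ring_nf

-- ===== VERDICT (by name: the statement is the Claim_ definition above) =====
theorem get_sentence_indices_list_spec : Claim_equal_get_sentence_indices_list := by
  intro xs _
  unfold Spec_get_sentence_indices_list get_sentence_indices_list get_sentence_indices_list_alt
  have hb := getSIL_goB_eq xs 0
  rw [zero_add] at hb
  simp only []
  rw [hb, List.reverse_reverse]
  cases xs with
  | nil => simp [getSIL_goA, getSIL_spansFrom]
  | cons s rest =>
    simp only [getSIL_goA, getSIL_spansFrom, if_true]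
    rw [getSIL_goA_eq rest (0 + 1) (PySem.Str.len s) (by omega)]
    simp
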